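-- pv_equiv track=rewrite | github.com/victron/interv | lexics.py | find_word
-- ===== SOURCE A (Python) =====
-- def find_word(l1: list, l2: list, cental_letter= '') -> str:
--     word = cental_letter
--     for el1, el2 in zip(l1, l2):
--         if el1 != el2:
--             break
--         else:
--             word = el1 + word + el2
--             continue
--     return word
-- ===== SOURCE B (Python) =====
-- from itertools import takewhile
--
--
-- def find_word(l1: list, l2: list, cental_letter='') -> str:
--     matched = list(takewhile(lambda p: p[0] == p[1], zip(l1, l2)))
--     lefts = [p[0] for p in matched]
--     rights = [p[1] for p in matched]
--     return ''.join(reversed(lefts)) + cental_letter + ''.join(rights)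
-- ===== Notes on version B (the rewrite author's own statement) =====
-- stated objective: faster
-- what changed: Replaces the incremental wrap-around loop (word = el1 + word + el2 at each matching pair, repeatedly rebuilding the growing string) by a takewhile gather of the matched prefix followed by a reversed-join assembly ''.join(reversed(lefts)) + cental_letter + ''.join(rights).
import Mathlib
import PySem

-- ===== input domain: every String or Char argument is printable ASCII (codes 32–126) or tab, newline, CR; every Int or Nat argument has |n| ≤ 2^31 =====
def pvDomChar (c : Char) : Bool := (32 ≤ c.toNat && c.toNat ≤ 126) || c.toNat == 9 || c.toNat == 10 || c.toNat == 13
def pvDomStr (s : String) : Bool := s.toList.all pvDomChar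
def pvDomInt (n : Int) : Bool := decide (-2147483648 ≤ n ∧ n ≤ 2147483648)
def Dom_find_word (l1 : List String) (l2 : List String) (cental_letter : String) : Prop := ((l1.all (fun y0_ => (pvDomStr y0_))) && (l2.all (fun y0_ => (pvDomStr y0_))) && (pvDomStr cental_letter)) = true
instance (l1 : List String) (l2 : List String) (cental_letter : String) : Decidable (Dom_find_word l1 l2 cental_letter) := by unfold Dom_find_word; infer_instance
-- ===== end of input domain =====

-- B replaces A's incremental wrap-around loop by a takewhile gather of the matched
-- prefix plus a reversed-join assembly (objective: simpler).

-- ===== PORT A =====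
-- the for-loop with break, as structural recursion over zip(l1, l2) carrying `word`
def find_word_go : List (String × String) → String → String
  | [], word => word
  | (el1, el2) :: rest, word =>
      if el1 ≠ el2 then word else find_word_go rest (el1 ++ word ++ el2)

def find_word (l1 : List String) (l2 : List String) (cental_letter : String) : String :=
  find_word_go (l1.zip l2) cental_letter

-- ===== PORT B =====
def find_word_alt (l1 : List String) (l2 : List String) (cental_letter : String) : String :=
  let matched := (l1.zip l2).takeWhile (fun p => p.1 == p.2)
  let lefts := matched.map (fun p => p.1)
  let rights := matched.map (fun p => p.2)
  PySem.Str.join "" lefts.reverse ++ cental_letter ++ PySem.Str.join "" rights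

-- ===== PRECONDITION & SPEC =====
def Spec_find_word (l1 : List String) (l2 : List String) (cental_letter : String) (out : String) : Prop := out = find_word_alt l1 l2 cental_letter
instance (l1 : List String) (l2 : List String) (cental_letter : String) (out : String) : Decidable (Spec_find_word l1 l2 cental_letter out) := by unfold Spec_find_word; infer_instance

-- ===== CLAIM (what is proved, stated in full; the proofs are below) =====
def Claim_equal_find_word : Prop := ∀ (l1 : List String) (l2 : List String) (cental_letter : String), Dom_find_word l1 l2 cental_letter → Spec_find_word l1 l2 cental_letter (find_word l1 l2 cental_letter)

-- ===== LEMMAS AND PROOFS =====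

-- ''.join over strings is concatenation of the character lists
theorem join_empty_toList (xs : List String) :
    (PySem.Str.join "" xs).toList = (xs.map String.toList).flatten := by
  induction xs with
  | nil => simp [PySem.Str.toList_join, PySem.Chars.join_nil]
  | cons p rest ih =>
      cases rest with
      | nil => simp [PySem.Str.toList_join, PySem.Chars.join, List.intercalate]
      | cons q r =>
          simp only [PySem.Str.toList_join, List.map_cons, PySem.Chars.join_cons_cons] at *
          simp only [List.flatten_cons] at *
          simp [← ih]

theorem join_empty_append (xs : List String) (a : String) :
    PySem.Str.join "" (xs ++ [a]) = PySem.Str.join "" xs ++ a := by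
  apply String.toList_inj.mp
  simp only [String.toList_append, join_empty_toList, List.map_append, List.map_nil,
    List.map_cons, List.flatten_append, List.flatten_cons, List.flatten_nil, List.append_nil]

theorem join_empty_cons (a : String) (xs : List String) :
    PySem.Str.join "" (a :: xs) = a ++ PySem.Str.join "" xs := by
  apply String.toList_inj.mp
  simp only [String.toList_append, join_empty_toList, List.map_cons, List.flatten_cons]

theorem go_eq (pairs : List (String × String)) (w : String) :
    find_word_go pairs w =
      PySem.Str.join "" ((pairs.takeWhile (fun p => p.1 == p.2)).map (fun p => p.1)).reverse
        ++ w ++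
      PySem.Str.join "" ((pairs.takeWhile (fun p => p.1 == p.2)).map (fun p => p.2)) := by
  induction pairs generalizing w with
  | nil => simp [find_word_go, PySem.Str.join]
  | cons p rest ih =>
      obtain ⟨a, b⟩ := p
      by_cases h : a = b
      · subst h
        simp only [find_word_go, List.takeWhile_cons, beq_self_eq_true, if_pos, ne_eq,
          not_true_eq_false, if_false, ih, List.map_cons, List.reverse_cons,
          join_empty_append, join_empty_cons]
        apply String.toList_inj.mp
        simp
      · simp [find_word_go, h, PySem.Str.join]

-- ===== VERDICT (by name: the statement is the Claim_ definition above) =====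
theorem find_word_spec : Claim_equal_find_word := by
  intro l1 l2 c _
  unfold Spec_find_word find_word find_word_alt
  exact go_eq (l1.zip l2) c
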